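-- pv_equiv track=rewrite | github.com/MurderWizard/pokemon-arbitrage-webhook | massive_database_builder.py | generate_popular_cards_by_set
-- ===== SOURCE A (Python) =====
-- from typing import List, Dict, Optional
--
-- def generate_popular_cards_by_set(set_name: str) -> List[str]:
--     """Generate popular card names for a given set"""
--     popular_pokemon = [
--         'Charizard', 'Pikachu', 'Rayquaza', 'Lugia', 'Mewtwo', 'Mew',
--         'Umbreon', 'Espeon', 'Sylveon', 'Leafeon', 'Glaceon', 'Jolteon',
--         'Vaporeon', 'Flareon', 'Eevee', 'Dragonite', 'Gyarados', 'Blastoise',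
--         'Venusaur', 'Alakazam', 'Gengar', 'Machamp', 'Golem', 'Arcanine',
--         'Lapras', 'Snorlax', 'Articuno', 'Zapdos', 'Moltres', 'Ditto',
--         'Scyther', 'Electabuzz', 'Magmar', 'Pinsir', 'Tauros', 'Magikarp',
--         'Clefairy', 'Wigglytuff', 'Vileplume', 'Parasect', 'Venomoth',
--         'Dugtrio', 'Persian', 'Psyduck', 'Golduck', 'Primeape', 'Rapidash'
--     ]
--
--     card_names = []
--
--     # Determine card types based on set era
--     if any(modern in set_name.lower() for modern in [
--         'sword', 'shield', 'rebel', 'darkness', 'champions', 'vivid',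
--         'shining fates', 'battle', 'chilling', 'evolving', 'fusion',
--         'brilliant', 'astral', 'lost origin', 'silver tempest'
--     ]):
--         # Modern sets have VMAX, V, etc.
--         for pokemon in popular_pokemon[:20]:  # Top 20 for modern sets
--             card_names.extend([
--                 f"{pokemon} VMAX",
--                 f"{pokemon} V",
--                 f"{pokemon} (Full Art)",
--                 f"{pokemon} (Secret Rare)",
--                 f"{pokemon} (Rainbow Rare)"
--             ])
--
--     elif any(sm in set_name.lower() for sm in [
--         'sun', 'moon', 'guardians', 'burning', 'shining legends',
--         'crimson', 'ultra', 'forbidden', 'celestial', 'lost thunder',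
--         'team up', 'unbroken', 'unified', 'hidden fates', 'cosmic'
--     ]):
--         # Sun & Moon era has GX
--         for pokemon in popular_pokemon[:20]:
--             card_names.extend([
--                 f"{pokemon} GX",
--                 f"{pokemon} (Full Art)",
--                 f"{pokemon} (Secret Rare)",
--                 f"{pokemon} (Rainbow Rare)"
--             ])
--
--     elif 'base set' in set_name.lower() or 'jungle' in set_name.lower() or 'fossil' in set_name.lower():
--         # Classic sets
--         for pokemon in popular_pokemon[:16]:  # Base set had 16 holos
--             card_names.extend([
--                 f"{pokemon}",
--                 f"{pokemon} (Holo)",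
--                 f"{pokemon} (1st Edition)",
--                 f"{pokemon} (Shadowless)"
--             ])
--
--     else:
--         # General case - add basic versions
--         for pokemon in popular_pokemon[:15]:
--             card_names.extend([
--                 f"{pokemon}",
--                 f"{pokemon} (Holo)",
--                 f"{pokemon} EX",
--                 f"{pokemon} (Full Art)"
--             ])
--
--     return card_names[:50]  # Limit to 50 cards per set
-- ===== SOURCE B (Python) =====
-- from typing import List
--
--
-- def generate_popular_cards_by_set(set_name: str) -> List[str]:
--     """Generate popular card names for a given set.
--
--     Era selection: every era keyword is tagged with its era id in one flat
--     dict; the chosen era is the MINIMUM id among keywords found in the set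
--     name (smaller id = higher priority), defaulting to the general era 3.
--     Name generation: one divmod-indexed pass i -> pokemon[i//m] + suffix[i%m]
--     over exactly min(50, count*m) indices, instead of nested loops + a cap.
--     """
--     popular_pokemon = [
--         'Charizard', 'Pikachu', 'Rayquaza', 'Lugia', 'Mewtwo', 'Mew',
--         'Umbreon', 'Espeon', 'Sylveon', 'Leafeon', 'Glaceon', 'Jolteon',
--         'Vaporeon', 'Flareon', 'Eevee', 'Dragonite', 'Gyarados', 'Blastoise',
--         'Venusaur', 'Alakazam', 'Gengar', 'Machamp', 'Golem', 'Arcanine',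
--         'Lapras', 'Snorlax', 'Articuno', 'Zapdos', 'Moltres', 'Ditto',
--         'Scyther', 'Electabuzz', 'Magmar', 'Pinsir', 'Tauros', 'Magikarp',
--         'Clefairy', 'Wigglytuff', 'Vileplume', 'Parasect', 'Venomoth',
--         'Dugtrio', 'Persian', 'Psyduck', 'Golduck', 'Primeape', 'Rapidash'
--     ]
--
--     keyword_era = {
--         'sword': 0, 'shield': 0, 'rebel': 0, 'darkness': 0, 'champions': 0,
--         'vivid': 0, 'shining fates': 0, 'battle': 0, 'chilling': 0,
--         'evolving': 0, 'fusion': 0, 'brilliant': 0, 'astral': 0,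
--         'lost origin': 0, 'silver tempest': 0,
--         'sun': 1, 'moon': 1, 'guardians': 1, 'burning': 1,
--         'shining legends': 1, 'crimson': 1, 'ultra': 1, 'forbidden': 1,
--         'celestial': 1, 'lost thunder': 1, 'team up': 1, 'unbroken': 1,
--         'unified': 1, 'hidden fates': 1, 'cosmic': 1,
--         'base set': 2, 'jungle': 2, 'fossil': 2,
--     }
--
--     era_params = [
--         (20, [' VMAX', ' V', ' (Full Art)', ' (Secret Rare)', ' (Rainbow Rare)']),
--         (20, [' GX', ' (Full Art)', ' (Secret Rare)', ' (Rainbow Rare)']),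
--         (16, ['', ' (Holo)', ' (1st Edition)', ' (Shadowless)']),
--         (15, ['', ' (Holo)', ' EX', ' (Full Art)']),
--     ]
--
--     lowered = set_name.lower()
--     era = min((e for k, e in keyword_era.items() if k in lowered), default=3)
--     count, suffixes = era_params[era]
--     m = len(suffixes)
--     return [popular_pokemon[i // m] + suffixes[i % m]
--             for i in range(min(50, count * m))]
-- ===== Notes on version B (the rewrite author's own statement) =====
-- stated objective: alternative
-- what changed: Era choice becomes the minimum era id over a flat keyword->era dict (instead of an if/elif chain of any() checks), and card names come from one divmod-indexed pass pokemon[i//m]+suffix[i%m] over min(50, count*m) indices (instead of nested per-pokemon extend loops capped afterwards).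
import Mathlib
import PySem

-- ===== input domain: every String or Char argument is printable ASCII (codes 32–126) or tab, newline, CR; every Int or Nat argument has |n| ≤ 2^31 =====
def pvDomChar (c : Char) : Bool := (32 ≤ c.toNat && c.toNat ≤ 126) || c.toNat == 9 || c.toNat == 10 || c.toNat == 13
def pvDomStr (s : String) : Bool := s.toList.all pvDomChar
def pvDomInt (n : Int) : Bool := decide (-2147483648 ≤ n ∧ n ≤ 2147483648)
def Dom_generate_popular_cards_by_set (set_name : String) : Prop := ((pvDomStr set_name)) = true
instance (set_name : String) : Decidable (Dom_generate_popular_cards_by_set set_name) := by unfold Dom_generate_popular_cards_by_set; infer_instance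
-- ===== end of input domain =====

-- B picks the era as the minimum era id over a flat keyword->era dict and builds the names
-- by one divmod-indexed pass pokemon[i//m] + suffix[i%m] (objective: alternative algorithm).

-- ===== PORT A =====
def pvPokemon : List String := [
  "Charizard", "Pikachu", "Rayquaza", "Lugia", "Mewtwo", "Mew",
  "Umbreon", "Espeon", "Sylveon", "Leafeon", "Glaceon", "Jolteon",
  "Vaporeon", "Flareon", "Eevee", "Dragonite", "Gyarados", "Blastoise",
  "Venusaur", "Alakazam", "Gengar", "Machamp", "Golem", "Arcanine",
  "Lapras", "Snorlax", "Articuno", "Zapdos", "Moltres", "Ditto",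
  "Scyther", "Electabuzz", "Magmar", "Pinsir", "Tauros", "Magikarp",
  "Clefairy", "Wigglytuff", "Vileplume", "Parasect", "Venomoth",
  "Dugtrio", "Persian", "Psyduck", "Golduck", "Primeape", "Rapidash"]

def generate_popular_cards_by_set (set_name : String) : List String :=
  let popular_pokemon := pvPokemon
  let card_names : List String := []
  let card_names :=
    if ([ "sword", "shield", "rebel", "darkness", "champions", "vivid",
          "shining fates", "battle", "chilling", "evolving", "fusion",
          "brilliant", "astral", "lost origin", "silver tempest"
        ].any (fun modern => PySem.Str.isIn modern (PySem.Str.lower set_name))) then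
      (PySem.List.slice popular_pokemon none (some 20)).foldl (fun cn pokemon =>
        cn ++ [pokemon ++ " VMAX", pokemon ++ " V", pokemon ++ " (Full Art)",
               pokemon ++ " (Secret Rare)", pokemon ++ " (Rainbow Rare)"]) card_names
    else if ([ "sun", "moon", "guardians", "burning", "shining legends",
               "crimson", "ultra", "forbidden", "celestial", "lost thunder",
               "team up", "unbroken", "unified", "hidden fates", "cosmic"
             ].any (fun sm => PySem.Str.isIn sm (PySem.Str.lower set_name))) then
      (PySem.List.slice popular_pokemon none (some 20)).foldl (fun cn pokemon =>
        cn ++ [pokemon ++ " GX", pokemon ++ " (Full Art)",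
               pokemon ++ " (Secret Rare)", pokemon ++ " (Rainbow Rare)"]) card_names
    else if (PySem.Str.isIn "base set" (PySem.Str.lower set_name)
             || PySem.Str.isIn "jungle" (PySem.Str.lower set_name)
             || PySem.Str.isIn "fossil" (PySem.Str.lower set_name)) then
      (PySem.List.slice popular_pokemon none (some 16)).foldl (fun cn pokemon =>
        cn ++ [pokemon, pokemon ++ " (Holo)", pokemon ++ " (1st Edition)",
               pokemon ++ " (Shadowless)"]) card_names
    else
      (PySem.List.slice popular_pokemon none (some 15)).foldl (fun cn pokemon =>
        cn ++ [pokemon, pokemon ++ " (Holo)", pokemon ++ " EX",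
               pokemon ++ " (Full Art)"]) card_names
  PySem.List.slice card_names none (some 50)

-- ===== PORT B =====
-- keyword -> era id, one flat dict (assoc list, insertion order)
def pvKeywordEra : List (String × Int) := [
  ("sword", 0), ("shield", 0), ("rebel", 0), ("darkness", 0), ("champions", 0),
  ("vivid", 0), ("shining fates", 0), ("battle", 0), ("chilling", 0),
  ("evolving", 0), ("fusion", 0), ("brilliant", 0), ("astral", 0),
  ("lost origin", 0), ("silver tempest", 0),
  ("sun", 1), ("moon", 1), ("guardians", 1), ("burning", 1),
  ("shining legends", 1), ("crimson", 1), ("ultra", 1), ("forbidden", 1),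
  ("celestial", 1), ("lost thunder", 1), ("team up", 1), ("unbroken", 1),
  ("unified", 1), ("hidden fates", 1), ("cosmic", 1),
  ("base set", 2), ("jungle", 2), ("fossil", 2)]

def pvEraParams : List (Int × List String) := [
  (20, [" VMAX", " V", " (Full Art)", " (Secret Rare)", " (Rainbow Rare)"]),
  (20, [" GX", " (Full Art)", " (Secret Rare)", " (Rainbow Rare)"]),
  (16, ["", " (Holo)", " (1st Edition)", " (Shadowless)"]),
  (15, ["", " (Holo)", " EX", " (Full Art)"])]

-- min((e for k, e in keyword_era.items() if k in lowered), default=3)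
def pvEraOf (lowered : String) : Int :=
  (PySem.List.min?
    ((pvKeywordEra.filter (fun p => PySem.Str.isIn p.1 lowered)).map (fun p => p.2))
    (fun x => x)).getD 3

def generate_popular_cards_by_set_alt (set_name : String) : List String :=
  let lowered := PySem.Str.lower set_name
  let era := pvEraOf lowered
  let params := (PySem.List.pyGet? pvEraParams era).getD (0, [])
  let count := params.1
  let suffixes := params.2
  let m : Int := suffixes.length
  (PySem.List.pyRange 0 (min 50 (count * m)) 1).map (fun i =>
    (PySem.List.pyGet? pvPokemon (PySem.Int.floordiv i m)).getD "" ++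
    (PySem.List.pyGet? suffixes (PySem.Int.mod i m)).getD "")

-- ===== PRECONDITION & SPEC =====
def Spec_generate_popular_cards_by_set (set_name : String) (out : List String) : Prop := out = generate_popular_cards_by_set_alt set_name
instance (set_name : String) (out : List String) : Decidable (Spec_generate_popular_cards_by_set set_name out) := by unfold Spec_generate_popular_cards_by_set; infer_instance

-- ===== CLAIM (what is proved, stated in full; the proofs are below) =====
def Claim_equal_generate_popular_cards_by_set : Prop := ∀ (set_name : String), Dom_generate_popular_cards_by_set set_name → Spec_generate_popular_cards_by_set set_name (generate_popular_cards_by_set set_name)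

-- ===== LEMMAS AND PROOFS =====

-- A's three keyword groups, as lists (proof-side names)
def pvKws0 : List String :=
  ["sword", "shield", "rebel", "darkness", "champions", "vivid",
   "shining fates", "battle", "chilling", "evolving", "fusion",
   "brilliant", "astral", "lost origin", "silver tempest"]
def pvKws1 : List String :=
  ["sun", "moon", "guardians", "burning", "shining legends",
   "crimson", "ultra", "forbidden", "celestial", "lost thunder",
   "team up", "unbroken", "unified", "hidden fates", "cosmic"]
def pvKws2 : List String := ["base set", "jungle", "fossil"]

theorem pvKeywordEra_split :
    pvKeywordEra = (pvKws0.map (fun k => (k, (0 : Int))))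
      ++ (pvKws1.map (fun k => (k, (1 : Int))))
      ++ (pvKws2.map (fun k => (k, (2 : Int)))) := by decide

-- a value of a filtered keyword list, membership characterisation
theorem pvMem_matched (P : String → Bool) (e : Int) :
    (e ∈ ((pvKeywordEra.filter (fun p => P p.1)).map (fun p => p.2)))
      ↔ ((e = 0 ∧ pvKws0.any P) ∨ (e = 1 ∧ pvKws1.any P) ∨ (e = 2 ∧ pvKws2.any P)) := by
  rw [pvKeywordEra_split]
  simp only [List.filter_append, List.map_append, List.mem_append, List.filter_map,
    List.mem_map, List.mem_filter, List.any_eq_true, Function.comp]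
  aesop

theorem pvMin?_eq_of {L : List Int} {e : Int} (he : e ∈ L) (hmin : ∀ y ∈ L, e ≤ y) :
    PySem.List.min? L (fun x => x) = some e := by
  cases h : PySem.List.min? L (fun x => x) with
  | none =>
      rw [PySem.List.min?_eq_none_iff] at h
      simp [h] at he
  | some m =>
      have hm := PySem.List.min?_mem h
      have h1 := PySem.List.min?_isMin h e he
      have h2 := hmin m hm
      simp only [] at h1
      exact congrArg some (le_antisymm h1 h2)

theorem pvEraOf_char (l : String) :
    pvEraOf l =
      (if pvKws0.any (fun k => PySem.Str.isIn k l) then (0 : Int)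
       else if pvKws1.any (fun k => PySem.Str.isIn k l) then 1
       else if pvKws2.any (fun k => PySem.Str.isIn k l) then 2
       else 3) := by
  unfold pvEraOf
  set P := fun k => PySem.Str.isIn k l with hP
  have hmemM := pvMem_matched (fun p => P p)
  by_cases h0 : pvKws0.any P
  · rw [pvMin?_eq_of ((hmemM 0).2 (Or.inl ⟨rfl, h0⟩))
      (fun y hy => by rcases (hmemM y).1 hy with ⟨rfl,_⟩|⟨rfl,_⟩|⟨rfl,_⟩ <;> omega)]
    simp [h0]
  · by_cases h1 : pvKws1.any P
    · rw [pvMin?_eq_of ((hmemM 1).2 (Or.inr (Or.inl ⟨rfl, h1⟩)))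
        (fun y hy => by rcases (hmemM y).1 hy with ⟨rfl,hk⟩|⟨rfl,_⟩|⟨rfl,_⟩ <;>
          first | (exact absurd hk h0) | omega)]
      simp [h0, h1]
    · by_cases h2 : pvKws2.any P
      · rw [pvMin?_eq_of ((hmemM 2).2 (Or.inr (Or.inr ⟨rfl, h2⟩)))
          (fun y hy => by rcases (hmemM y).1 hy with ⟨rfl,hk⟩|⟨rfl,hk⟩|⟨rfl,_⟩ <;>
            first | (exact absurd hk h0) | (exact absurd hk h1) | omega)]
        simp [h0, h1, h2]
      · have : ((pvKeywordEra.filter (fun p => P p.1)).map (fun p => p.2)) = [] := by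
          rw [List.eq_nil_iff_forall_not_mem]
          intro y hy
          rcases (hmemM y).1 hy with ⟨_,hk⟩|⟨_,hk⟩|⟨_,hk⟩
          · exact h0 hk
          · exact h1 hk
          · exact h2 hk
        rw [this]
        simp [PySem.List.min?, h0, h1, h2]

-- A's classic-set or-chain equals any over pvKws2
theorem pvCond2_eq (s : String) :
    (PySem.Str.isIn "base set" (PySem.Str.lower s)
      || PySem.Str.isIn "jungle" (PySem.Str.lower s)
      || PySem.Str.isIn "fossil" (PySem.Str.lower s))
    = pvKws2.any (fun k => PySem.Str.isIn k (PySem.Str.lower s)) := by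
  simp [pvKws2, Bool.or_assoc]

-- ===== VERDICT (by name: the statement is the Claim_ definition above) =====
theorem generate_popular_cards_by_set_spec : Claim_equal_generate_popular_cards_by_set := by
  intro set_name _
  unfold Spec_generate_popular_cards_by_set generate_popular_cards_by_set generate_popular_cards_by_set_alt
  simp only [pvEraOf_char, pvCond2_eq, pvKws0, pvKws1, pvKws2]
  split_ifs <;> decide
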